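-- pv_equiv track=rewrite | github.com/adc-code/Math_Various | ChaosGame/Python/ChaosGame_Extra.py | MakeConstraintList
-- ===== SOURCE A (Python) =====
-- def MakeConstraintList (iRuleNum, iNumCorners):
--
--     constraintCornerList = []
--
--     # opposite corner constraint
--     if iRuleNum == 3 or iRuleNum == 6:
--
--         for i in range (int(iNumCorners / 2), iNumCorners):
--             constraintCornerList.append (i)
--
--         for i in range (int(iNumCorners / 2)):
--             constraintCornerList.append (i)
--
--     # next counter clockwise corner constraint
--     if iRuleNum == 4 or iRuleNum == 7:
--
--         for i in range (iNumCorners):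
--             offset = i - 1
--             if offset < 0:
--                offset += iNumCorners
--             constraintCornerList.append (offset)
--
--     # next clockwise corner constraint
--     if iRuleNum == 5 or iRuleNum == 8:
--
--         for i in range (iNumCorners):
--             offset = i + 1
--             if offset == iNumCorners:
--                offset = 0
--             constraintCornerList.append (offset)
--
--     return constraintCornerList
-- ===== SOURCE B (Python) =====
-- # Slice-rotation rewrite: pick the rule's rotation point k, build range(n) once,
-- # and return the two slices base[k:] + base[:k] (no per-element computation or wrap logic).
-- def MakeConstraintList(iRuleNum, iNumCorners):
--     if iRuleNum in (3, 6):
--         k = int(iNumCorners / 2)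
--     elif iRuleNum in (4, 7):
--         k = -1
--     elif iRuleNum in (5, 8):
--         k = 1
--     else:
--         return []
--     base = list(range(iNumCorners))
--     return base[k:] + base[:k]
-- ===== Notes on version B (the rewrite author's own statement) =====
-- stated objective: simpler
-- what changed: Instead of A's three per-rule append loops computing each wrapped index element by element, B materialises range(iNumCorners) once, maps the rule to a single rotation point k, and returns the concatenation of the two slices base[k:] + base[:k].
import Mathlib
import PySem

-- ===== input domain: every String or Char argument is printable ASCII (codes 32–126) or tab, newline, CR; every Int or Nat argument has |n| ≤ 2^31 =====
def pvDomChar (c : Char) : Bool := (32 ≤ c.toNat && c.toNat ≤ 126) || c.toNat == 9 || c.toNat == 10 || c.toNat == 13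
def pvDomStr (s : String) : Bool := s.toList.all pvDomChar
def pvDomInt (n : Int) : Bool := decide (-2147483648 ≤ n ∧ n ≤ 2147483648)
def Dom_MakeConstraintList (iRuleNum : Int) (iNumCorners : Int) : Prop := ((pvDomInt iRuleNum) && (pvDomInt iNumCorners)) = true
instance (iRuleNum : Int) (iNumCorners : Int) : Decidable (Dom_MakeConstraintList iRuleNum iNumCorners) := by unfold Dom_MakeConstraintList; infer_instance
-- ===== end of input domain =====

-- B replaces A's three per-rule element-by-element append loops by building range(n) once,
-- mapping the rule to one rotation point k, and returning the slices base[k:] + base[:k]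
-- (objective: simpler).

-- ===== PORT A =====
-- int(iNumCorners / 2) is exact float division + truncation within Dom: PySem.Int.truncdiv.
def MakeConstraintList (iRuleNum : Int) (iNumCorners : Int) : List Int :=
  let l : List Int := []
  -- opposite corner constraint
  let l := if iRuleNum == 3 || iRuleNum == 6 then
      let l := (PySem.List.pyRange (PySem.Int.truncdiv iNumCorners 2) iNumCorners 1).foldl
        (fun acc i => acc ++ [i]) l
      (PySem.List.pyRange 0 (PySem.Int.truncdiv iNumCorners 2) 1).foldl
        (fun acc i => acc ++ [i]) l
    else l
  -- next counter clockwise corner constraint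
  let l := if iRuleNum == 4 || iRuleNum == 7 then
      (PySem.List.pyRange 0 iNumCorners 1).foldl (fun acc i =>
        let offset := i - 1
        let offset := if offset < 0 then offset + iNumCorners else offset
        acc ++ [offset]) l
    else l
  -- next clockwise corner constraint
  let l := if iRuleNum == 5 || iRuleNum == 8 then
      (PySem.List.pyRange 0 iNumCorners 1).foldl (fun acc i =>
        let offset := i + 1
        let offset := if offset == iNumCorners then 0 else offset
        acc ++ [offset]) l
    else l
  l

-- ===== PORT B =====
def MakeConstraintList_alt (iRuleNum : Int) (iNumCorners : Int) : List Int :=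
  let rot : Int → List Int := fun k =>
    let base := PySem.List.pyRange 0 iNumCorners 1
    PySem.List.slice base (some k) none ++ PySem.List.slice base none (some k)
  if iRuleNum == 3 || iRuleNum == 6 then
    rot (PySem.Int.truncdiv iNumCorners 2)
  else if iRuleNum == 4 || iRuleNum == 7 then
    rot (-1)
  else if iRuleNum == 5 || iRuleNum == 8 then
    rot 1
  else []

-- ===== PRECONDITION & SPEC =====
def Spec_MakeConstraintList (iRuleNum : Int) (iNumCorners : Int) (out : List Int) : Prop := out = MakeConstraintList_alt iRuleNum iNumCorners
instance (iRuleNum : Int) (iNumCorners : Int) (out : List Int) : Decidable (Spec_MakeConstraintList iRuleNum iNumCorners out) := by unfold Spec_MakeConstraintList; infer_instance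

-- ===== CLAIM (what is proved, stated in full; the proofs are below) =====
def Claim_equal_MakeConstraintList : Prop := ∀ (iRuleNum : Int) (iNumCorners : Int), Dom_MakeConstraintList iRuleNum iNumCorners → Spec_MakeConstraintList iRuleNum iNumCorners (MakeConstraintList iRuleNum iNumCorners)

-- ===== LEMMAS AND PROOFS =====

lemma slice_nil (a? b? : Option Int) : PySem.List.slice ([] : List Int) a? b? = [] := by
  cases a? <;> cases b? <;> simp [PySem.List.slice]

-- half = int(n/2) sits between 0 and n when n > 0
lemma truncdiv_two_bounds_pos (n : Int) (h : 0 < n) :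
    0 ≤ PySem.Int.truncdiv n 2 ∧ PySem.Int.truncdiv n 2 ≤ n := by
  simp [PySem.Int.truncdiv]
  rw [Int.tdiv_eq_ediv_of_nonneg (by omega)]
  omega

lemma truncdiv_two_bounds_nonpos (n : Int) (h : n ≤ 0) :
    n ≤ PySem.Int.truncdiv n 2 ∧ PySem.Int.truncdiv n 2 ≤ 0 := by
  simp [PySem.Int.truncdiv]
  have : n.tdiv 2 = -((-n).tdiv 2) := by rw [← Int.neg_tdiv]; simp
  rw [this, Int.tdiv_eq_ediv_of_nonneg (by omega)]
  omega

-- B's rot k is the two ranges, for 0 ≤ k ≤ n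
lemma rot_eq (n k : Int) (h0 : 0 ≤ k) (hk : k ≤ n) :
    PySem.List.slice (PySem.List.pyRange 0 n 1) (some k) none ++
      PySem.List.slice (PySem.List.pyRange 0 n 1) none (some k) =
    PySem.List.pyRange k n 1 ++ PySem.List.pyRange 0 k 1 := by
  rw [PySem.List.slice_from _ h0, PySem.List.slice_to _ h0,
    PySem.List.pyRange_one_append 0 k n h0 hk]
  have hl : (PySem.List.pyRange 0 k 1).length = k.toNat := by
    simp [PySem.List.length_pyRange_one]
  rw [← hl, List.drop_left, List.take_left]

-- index shift of a range
lemma map_add_pyRange (c a b : Int) :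
    (PySem.List.pyRange a b 1).map (fun i => i + c) = PySem.List.pyRange (a + c) (b + c) 1 := by
  simp only [PySem.List.pyRange_one, List.map_map]
  have e : b + c - (a + c) = b - a := by ring
  rw [e]
  exact List.map_congr_left (fun x _ => by simp; ring)

-- ===== VERDICT (by name: the statement is the Claim_ definition above) =====
theorem MakeConstraintList_spec : Claim_equal_MakeConstraintList := by
  intro r n _
  unfold Spec_MakeConstraintList MakeConstraintList MakeConstraintList_alt
  by_cases h36 : (r == 3 || r == 6) = true
  · have hne4 : (r == 4 || r == 7) = false := by
      cases (by exact_mod_cast (by simpa using h36) : r = 3 ∨ r = 6) <;> simp_all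
    have hne5 : (r == 5 || r == 8) = false := by
      cases (by exact_mod_cast (by simpa using h36) : r = 3 ∨ r = 6) <;> simp_all
    simp only [h36, hne4, hne5, if_true, if_false, Bool.false_eq_true]
    rw [PySem.List.foldl_append_singleton_eq_self, PySem.List.foldl_append_singleton_eq_self,
      List.nil_append]
    by_cases hpos : 0 < n
    · obtain ⟨hb0, hb1⟩ := truncdiv_two_bounds_pos n hpos
      rw [rot_eq n _ hb0 hb1]
    · obtain ⟨hb0, hb1⟩ := truncdiv_two_bounds_nonpos n (by omega)
      rw [PySem.List.pyRange_one_eq_nil (a := PySem.Int.truncdiv n 2) (by omega),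
        PySem.List.pyRange_one_eq_nil (a := (0:Int)) (b := PySem.Int.truncdiv n 2) (by omega),
        PySem.List.pyRange_one_eq_nil (a := (0:Int)) (b := n) (by omega),
        slice_nil, slice_nil]
  · by_cases h47 : (r == 4 || r == 7) = true
    · have hne5 : (r == 5 || r == 8) = false := by
        cases (by exact_mod_cast (by simpa using h47) : r = 4 ∨ r = 7) <;> simp_all
      simp only [h36, h47, hne5, if_true, if_false, Bool.false_eq_true]
      rw [PySem.List.foldl_append_singleton_eq_map, List.nil_append]
      by_cases hpos : 0 < n
      · have hsplit : PySem.List.pyRange 0 n 1 =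
            PySem.List.pyRange 0 (n - 1) 1 ++ [n - 1] := by
          conv_lhs => rw [show n = (n - 1) + 1 from by ring]
          exact PySem.List.pyRange_one_succ_right (a := 0) (b := n - 1) (by omega)
        rw [PySem.List.slice_from_neg_one, PySem.List.slice_to_neg_one]
        conv_rhs => rw [hsplit]
        rw [List.dropLast_concat]
        have hdrop : List.drop ((PySem.List.pyRange 0 (n - 1) 1 ++ [n - 1]).length - 1)
            (PySem.List.pyRange 0 (n - 1) 1 ++ [n - 1]) = [n - 1] := by
          have hl : (PySem.List.pyRange 0 (n - 1) 1 ++ [n - 1]).length - 1 =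
              (PySem.List.pyRange 0 (n - 1) 1).length := by simp
          rw [hl]
          exact List.drop_left
        rw [hdrop]
        rw [PySem.List.pyRange_one_cons (by omega : (0:Int) < n)]
        simp only [List.map_cons]
        rw [show (0:Int) + 1 = 1 from by ring]
        have hhead : (if (0:Int) - 1 < 0 then 0 - 1 + n else 0 - 1) = n - 1 := by
          rw [if_pos (by omega)]; ring
        rw [hhead, List.singleton_append]
        congr 1
        rw [List.map_congr_left (g := fun i => i + (-1))
          (fun i hi => by
            obtain ⟨h1, h2⟩ := (PySem.List.mem_pyRange_one).1 hi
            rw [if_neg (by omega)]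
            ring)]
        rw [map_add_pyRange (-1) 1 n,
          show (1:Int) + -1 = 0 from by ring, show n + -1 = n - 1 from by ring]
      · rw [PySem.List.pyRange_one_eq_nil (a := (0:Int)) (b := n) (by omega)]
        simp [slice_nil]
    · by_cases h58 : (r == 5 || r == 8) = true
      · simp only [h36, h47, h58, if_true, if_false, Bool.false_eq_true]
        rw [PySem.List.foldl_append_singleton_eq_map, List.nil_append]
        by_cases hpos : 0 < n
        · have hrot := rot_eq n 1 (by omega) (by omega)
          rw [hrot]
          have hsplit : PySem.List.pyRange 0 n 1 =
              PySem.List.pyRange 0 (n - 1) 1 ++ [n - 1] := by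
            conv_lhs => rw [show n = (n - 1) + 1 from by ring]
            exact PySem.List.pyRange_one_succ_right (a := 0) (b := n - 1) (by omega)
          rw [hsplit, List.map_append]
          have hmap : (PySem.List.pyRange 0 (n - 1) 1).map
              (fun i => let offset := i + 1;
                let offset := if offset == n then 0 else offset; offset) =
              PySem.List.pyRange 1 n 1 := by
            rw [List.map_congr_left (g := fun i => i + 1)
              (fun i hi => by
                obtain ⟨h1, h2⟩ := (PySem.List.mem_pyRange_one).1 hi
                simp only []
                rw [if_neg (by simp; omega)])]
            rw [map_add_pyRange 1 0 (n - 1),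
              show (0:Int) + 1 = 1 from by ring, show n - 1 + 1 = n from by ring]
          rw [hmap]
          have hone : PySem.List.pyRange 0 1 1 = [(0:Int)] :=
            PySem.List.pyRange_one_singleton 0
          have hlast : ((fun i => let offset := i + 1;
              let offset := if offset == n then 0 else offset; offset) (n - 1) : Int) = 0 := by
            simp
          simp only [List.map_cons, List.map_nil, hlast, hone]
        · rw [PySem.List.pyRange_one_eq_nil (a := (0:Int)) (b := n) (by omega)]
          simp [slice_nil]
      · simp [h36, h47, h58]
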